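-- pv_equiv track=rewrite | github.com/sib-swiss/pyrheadb | src/pyrheadb/ReactionSmartsConverter.py | modify_rxn_smiles
-- ===== SOURCE A (Python) =====
-- def modify_rxn_smiles(rxn_smiles):
-- 	"""
-- 	Modifies the reaction SMILES to replace placeholders with isotopically labelled carbon.
-- 	This is necessary to be able to handle reaction SMILES with RXNMapper
-- 	:param rxn_smiles: The reaction SMILES string
-- 	:return: Modified SMILES string
-- 	"""
-- 	replacements = {
-- 		'[1*]': '[13C]', '[2*]': '[13C]', '[3*]': '[13C]', '[4*]': '[13C]', '[5*]': '[13C]',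
-- 		'[6*]': '[13C]', '[7*]': '[13C]', '[8*]': '[13C]', '[9*]': '[13C]', '[*-]': '[13C-]',
-- 		'[*:0]': '[13C]', '*': '[13C]'
-- 	}
-- 	for old, new in replacements.items():
-- 		rxn_smiles = rxn_smiles.replace(old, new)
-- 	return rxn_smiles
-- ===== SOURCE B (Python) =====
-- def modify_rxn_smiles(rxn_smiles):
-- 	"""
-- 	Modifies the reaction SMILES to replace placeholders with isotopically labelled carbon.
-- 	Single left-to-right scan: at each position the first placeholder (numbered dummies
-- 	first, then [*-], [*:0], bare '*' last) that matches is replaced; no placeholder can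
-- 	start inside a replacement output, so one pass gives the same result as the original
-- 	sequence of full-string replaces.
-- 	:param rxn_smiles: The reaction SMILES string
-- 	:return: Modified SMILES string
-- 	"""
-- 	placeholders = [('[%s*]' % d, '[13C]') for d in '123456789']
-- 	placeholders += [('[*-]', '[13C-]'), ('[*:0]', '[13C]'), ('*', '[13C]')]
-- 	out = []
-- 	i = 0
-- 	n = len(rxn_smiles)
-- 	while i < n:
-- 		for old, new in placeholders:
-- 			if rxn_smiles.startswith(old, i):
-- 				out.append(new)
-- 				i += len(old)
-- 				break
-- 		else:
-- 			out.append(rxn_smiles[i])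
-- 			i += 1
-- 	return ''.join(out)
-- ===== Notes on version B (the rewrite author's own statement) =====
-- stated objective: alternative
-- what changed: Instead of 12 sequential full-string str.replace passes, B makes one left-to-right scan that at each position substitutes the first matching placeholder (dict order, bare '*' last), which is safe because no replacement output can start or contain a placeholder.
import Mathlib
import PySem

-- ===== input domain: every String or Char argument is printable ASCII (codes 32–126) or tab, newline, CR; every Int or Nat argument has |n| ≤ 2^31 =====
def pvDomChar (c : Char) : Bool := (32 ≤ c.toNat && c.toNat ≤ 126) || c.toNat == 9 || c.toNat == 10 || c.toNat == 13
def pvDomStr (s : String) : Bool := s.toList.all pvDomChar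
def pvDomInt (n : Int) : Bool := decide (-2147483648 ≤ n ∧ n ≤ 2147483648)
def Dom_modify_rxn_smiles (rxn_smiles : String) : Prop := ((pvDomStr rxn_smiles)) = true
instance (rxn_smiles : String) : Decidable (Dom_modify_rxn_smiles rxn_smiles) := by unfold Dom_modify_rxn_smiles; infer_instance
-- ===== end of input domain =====

-- B replaces A's 12 sequential full-string rescans by ONE left-to-right scan that at each
-- position substitutes the first placeholder (dict order, bare '*' last) that matches there
-- (objective: alternative single-pass algorithm; same return value, proved below).

-- ===== PORT A =====
-- the replacements dict literal, in insertion order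
def replacementsA : List (String × String) :=
  [("[1*]", "[13C]"), ("[2*]", "[13C]"), ("[3*]", "[13C]"), ("[4*]", "[13C]"), ("[5*]", "[13C]"),
   ("[6*]", "[13C]"), ("[7*]", "[13C]"), ("[8*]", "[13C]"), ("[9*]", "[13C]"), ("[*-]", "[13C-]"),
   ("[*:0]", "[13C]"), ("*", "[13C]")]
-- for old, new in replacements.items(): rxn_smiles = rxn_smiles.replace(old, new)
def modify_rxn_smiles (rxn_smiles : String) : String :=
  replacementsA.foldl (fun s p => PySem.Str.replace s p.1 p.2) rxn_smiles

-- ===== PORT B =====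
-- the same dict, as (placeholder, replacement) pairs of char lists, insertion order
def patsB : List (List Char × List Char) :=
  (['1','2','3','4','5','6','7','8','9'].map
    (fun d => (['[', d, '*', ']'], ['[', '1', '3', 'C', ']']))) ++
  [(['[', '*', '-', ']'], ['[', '1', '3', 'C', '-', ']']),
   (['[', '*', ':', '0', ']'], ['[', '1', '3', 'C', ']']),
   (['*'], ['[', '1', '3', 'C', ']'])]

-- the single pass: at each position take the first matching placeholder, else copy the char
def scanB : List Char → List Char
  | [] => []
  | c :: t =>
    match patsB.find? (fun p => p.1.isPrefixOf (c :: t)) with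
    | some (pat, rep) => rep ++ scanB (t.drop (pat.length - 1))
    | none => c :: scanB t
termination_by l => l.length
decreasing_by
  all_goals simp
def modify_rxn_smiles_alt (rxn_smiles : String) : String :=
  String.ofList (scanB rxn_smiles.toList)

-- ===== PRECONDITION & SPEC =====
def Spec_modify_rxn_smiles (rxn_smiles : String) (out : String) : Prop := out = modify_rxn_smiles_alt rxn_smiles
instance (rxn_smiles : String) (out : String) : Decidable (Spec_modify_rxn_smiles rxn_smiles out) := by unfold Spec_modify_rxn_smiles; infer_instance

-- ===== CLAIM (what is proved, stated in full; the proofs are below) =====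
def Claim_equal_modify_rxn_smiles : Prop := ∀ (rxn_smiles : String), Dom_modify_rxn_smiles rxn_smiles → Spec_modify_rxn_smiles rxn_smiles (modify_rxn_smiles rxn_smiles)

-- ===== LEMMAS AND PROOFS =====

-- patsB, written out
lemma patsB_eq : patsB =
  [(['[','1','*',']'], ['[','1','3','C',']']),
   (['[','2','*',']'], ['[','1','3','C',']']),
   (['[','3','*',']'], ['[','1','3','C',']']),
   (['[','4','*',']'], ['[','1','3','C',']']),
   (['[','5','*',']'], ['[','1','3','C',']']),
   (['[','6','*',']'], ['[','1','3','C',']']),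
   (['[','7','*',']'], ['[','1','3','C',']']),
   (['[','8','*',']'], ['[','1','3','C',']']),
   (['[','9','*',']'], ['[','1','3','C',']']),
   (['[','*','-',']'], ['[','1','3','C','-',']']),
   (['[','*',':','0',']'], ['[','1','3','C',']']),
   (['*'], ['[','1','3','C',']'])] := by decide

-- clean structural recursion equal (for nonempty patterns) to PySem.Chars.replace
def replaceC (pat rep : List Char) : List Char → List Char
  | [] => []
  | c :: t =>
    if pat <+: (c :: t) then rep ++ replaceC pat rep (t.drop (pat.length - 1))
    else c :: replaceC pat rep t
termination_by l => l.length
decreasing_by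
  all_goals simp
lemma go_eq_replaceC (old new : List Char) (hold : old ≠ []) :
    ∀ (fuel : Nat) (l acc : List Char), l.length ≤ fuel →
      PySem.Chars.replace.go old new fuel l acc = acc.reverse ++ replaceC old new l := by
  intro fuel
  induction fuel with
  | zero =>
    intro l acc hl
    have : l = [] := List.eq_nil_of_length_eq_zero (Nat.le_zero.mp hl)
    subst this
    simp [PySem.Chars.replace.go, replaceC]
  | succ fuel ih =>
    intro l acc hl
    cases l with
    | nil => simp [PySem.Chars.replace.go, replaceC]
    | cons c t =>
      rw [PySem.Chars.replace.go]
      by_cases h : old <+: (c :: t)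
      · rw [if_pos (List.isPrefixOf_iff_prefix.mpr h)]
        obtain ⟨o, ot, rfl⟩ : ∃ o ot, old = o :: ot := by
          cases old with
          | nil => exact absurd rfl hold
          | cons o ot => exact ⟨o, ot, rfl⟩
        have hlen : (List.drop (o :: ot).length (c :: t)).length ≤ fuel := by
          simp at hl ⊢; omega
        rw [ih _ _ hlen]
        rw [replaceC, if_pos h]
        simp [List.drop_succ_cons]
      · rw [if_neg (by simpa [List.isPrefixOf_iff_prefix] using h)]
        have : t.length ≤ fuel := by simp at hl; omega
        rw [ih _ _ this, replaceC, if_neg h]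
        simp
lemma charsReplace_eq_replaceC (s old new : List Char) (hold : old ≠ []) :
    PySem.Chars.replace s old new = replaceC old new s := by
  rw [PySem.Chars.replace]
  rw [if_neg (by simpa [List.isEmpty_iff] using hold)]
  simpa using go_eq_replaceC old new hold s.length s [] (Nat.le_refl _)
-- "no new match at the front": a prefix free of the replacement's head char was already there
lemma prefix_of_replaceC (pat rep : List Char) (hr : ∃ r', rep = '[' :: r') :
    ∀ x w, '[' ∉ w → w <+: replaceC pat rep x → w <+: x := by
  intro x
  induction x using replaceC.induct pat with
  | case1 =>
    intro w hw h
    cases w with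
    | nil => exact List.nil_prefix
    | cons a w' => rw [replaceC] at h; exact absurd h (by simp)
  | case2 c t hpre ih =>
    intro w hw h
    rw [replaceC, if_pos hpre] at h
    cases w with
    | nil => exact List.nil_prefix
    | cons a w' =>
      obtain ⟨r', rfl⟩ := hr
      have : a = '[' := (List.cons_prefix_cons.mp h).1
      exact absurd (this ▸ List.mem_cons_self) hw
  | case3 c t hpre ih =>
    intro w hw h
    rw [replaceC, if_neg hpre] at h
    cases w with
    | nil => exact List.nil_prefix
    | cons a w' =>
      obtain ⟨rfl, h'⟩ := List.cons_prefix_cons.mp h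
      exact List.cons_prefix_cons.mpr
        ⟨rfl, ih w' (fun m => hw (List.mem_cons_of_mem _ m)) h'⟩
-- a replace whose pattern starts with h0 passes over an h0-free block unchanged
lemma replaceC_lbfree (h0 : Char) (pat rep : List Char) (hp : ∃ w, pat = h0 :: w)
    (u : List Char) (hu : h0 ∉ u) (x : List Char) :
    replaceC pat rep (u ++ x) = u ++ replaceC pat rep x := by
  induction u with
  | nil => rfl
  | cons c u' ih =>
    obtain ⟨w, rfl⟩ := hp
    have hnp : ¬ (h0 :: w) <+: (c :: (u' ++ x)) := by
      intro h
      exact hu ((List.cons_prefix_cons.mp h).1 ▸ List.mem_cons_self)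
    rw [List.cons_append, replaceC, if_neg hnp,
      ih (fun m => hu (List.mem_cons_of_mem _ m))]
    simp
-- a replace commutes with a leading block it can never match into
lemma replaceC_block (h0 : Char) (pat rep : List Char) (hp : ∃ w, pat = h0 :: w)
    (b : List Char) (hb0 : ∀ y, ¬ pat <+: (b ++ y)) (hbt : h0 ∉ b.tail) (x : List Char) :
    replaceC pat rep (b ++ x) = b ++ replaceC pat rep x := by
  cases b with
  | nil => rfl
  | cons c b' =>
    rw [List.cons_append, replaceC,
      if_neg (by simpa using hb0 x),
      replaceC_lbfree h0 pat rep hp b' hbt x]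
    simp
-- when no placeholder matches at the front, the whole chain just copies the first char
lemma chain_cons_nomatch (ps : List (List Char × List Char))
    (hshape : ∀ p ∈ ps, (∃ w, p.1 = '[' :: w ∧ '[' ∉ w) ∨ p.1 = ['*'])
    (hrep : ∀ p ∈ ps, ∃ r', p.2 = '[' :: r')
    (c : Char) (t : List Char) (h : ∀ p ∈ ps, ¬ p.1 <+: (c :: t)) :
    ps.foldl (fun s p => replaceC p.1 p.2 s) (c :: t)
      = c :: ps.foldl (fun s p => replaceC p.1 p.2 s) t := by
  induction ps generalizing t with
  | nil => rfl
  | cons q rest ih =>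
    simp only [List.foldl_cons]
    rw [replaceC, if_neg (h q List.mem_cons_self)]
    refine ih (fun p hp => hshape p (List.mem_cons_of_mem _ hp))
      (fun p hp => hrep p (List.mem_cons_of_mem _ hp)) _ ?_
    intro p hp hpre
    rcases hshape p (List.mem_cons_of_mem _ hp) with ⟨w, hw1, hw2⟩ | hstar
    · -- p = '[' :: w with no '[' inside w
      apply h p (List.mem_cons_of_mem _ hp)
      rw [hw1] at hpre ⊢
      obtain ⟨hc, hw'⟩ := List.cons_prefix_cons.mp hpre
      exact List.cons_prefix_cons.mpr
        ⟨hc, prefix_of_replaceC q.1 q.2 (hrep q List.mem_cons_self) t w hw2 hw'⟩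
    · -- p = ['*']
      apply h p (List.mem_cons_of_mem _ hp)
      rw [hstar] at hpre ⊢
      exact List.cons_prefix_cons.mpr
        ⟨(List.cons_prefix_cons.mp hpre).1, List.nil_prefix⟩
-- chainC is the list-level form of A: the 12 replaces in sequence
def chainC (s : List Char) : List Char :=
  patsB.foldl (fun s p => replaceC p.1 p.2 s) s
lemma replaceC_head (pat rep x : List Char) (h : pat ≠ []) :
    replaceC pat rep (pat ++ x) = rep ++ replaceC pat rep x := by
  cases pat with
  | nil => exact absurd rfl h
  | cons c pt =>
    rw [List.cons_append, replaceC,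
      if_pos (List.cons_prefix_cons.mpr ⟨rfl, List.prefix_append _ _⟩)]
    simp
-- when a placeholder matches at the front, the chain rewrites it and goes on with the rest
lemma chain_match (pat rep : List Char) (hmem : (pat, rep) ∈ patsB) (x : List Char) :
    chainC (pat ++ x) = rep ++ chainC x := by
  simp only [patsB_eq, List.mem_cons, Prod.mk.injEq, List.not_mem_nil, or_false] at hmem
  rcases hmem with ⟨rfl,rfl⟩|⟨rfl,rfl⟩|⟨rfl,rfl⟩|⟨rfl,rfl⟩|⟨rfl,rfl⟩|⟨rfl,rfl⟩|⟨rfl,rfl⟩|⟨rfl,rfl⟩|⟨rfl,rfl⟩|⟨rfl,rfl⟩|⟨rfl,rfl⟩|⟨rfl,rfl⟩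
  · -- pattern 0
    simp only [chainC, patsB_eq, List.foldl_cons, List.foldl_nil]
    rw [replaceC_head _ _ _ (by simp)]
    rw [replaceC_block '[' ['[','2','*',']'] ['[','1','3','C',']'] ⟨_, rfl⟩ ['[','1','3','C',']'] (by intro y; simp) (by decide)]
    rw [replaceC_block '[' ['[','3','*',']'] ['[','1','3','C',']'] ⟨_, rfl⟩ ['[','1','3','C',']'] (by intro y; simp) (by decide)]
    rw [replaceC_block '[' ['[','4','*',']'] ['[','1','3','C',']'] ⟨_, rfl⟩ ['[','1','3','C',']'] (by intro y; simp) (by decide)]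
    rw [replaceC_block '[' ['[','5','*',']'] ['[','1','3','C',']'] ⟨_, rfl⟩ ['[','1','3','C',']'] (by intro y; simp) (by decide)]
    rw [replaceC_block '[' ['[','6','*',']'] ['[','1','3','C',']'] ⟨_, rfl⟩ ['[','1','3','C',']'] (by intro y; simp) (by decide)]
    rw [replaceC_block '[' ['[','7','*',']'] ['[','1','3','C',']'] ⟨_, rfl⟩ ['[','1','3','C',']'] (by intro y; simp) (by decide)]
    rw [replaceC_block '[' ['[','8','*',']'] ['[','1','3','C',']'] ⟨_, rfl⟩ ['[','1','3','C',']'] (by intro y; simp) (by decide)]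
    rw [replaceC_block '[' ['[','9','*',']'] ['[','1','3','C',']'] ⟨_, rfl⟩ ['[','1','3','C',']'] (by intro y; simp) (by decide)]
    rw [replaceC_block '[' ['[','*','-',']'] ['[','1','3','C','-',']'] ⟨_, rfl⟩ ['[','1','3','C',']'] (by intro y; simp) (by decide)]
    rw [replaceC_block '[' ['[','*',':','0',']'] ['[','1','3','C',']'] ⟨_, rfl⟩ ['[','1','3','C',']'] (by intro y; simp) (by decide)]
    rw [replaceC_block '*' ['*'] ['[','1','3','C',']'] ⟨_, rfl⟩ ['[','1','3','C',']'] (by intro y; simp) (by decide)]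
  · -- pattern 1
    simp only [chainC, patsB_eq, List.foldl_cons, List.foldl_nil]
    rw [replaceC_block '[' ['[','1','*',']'] ['[','1','3','C',']'] ⟨_, rfl⟩ ['[','2','*',']'] (by intro y; simp) (by decide)]
    rw [replaceC_head _ _ _ (by simp)]
    rw [replaceC_block '[' ['[','3','*',']'] ['[','1','3','C',']'] ⟨_, rfl⟩ ['[','1','3','C',']'] (by intro y; simp) (by decide)]
    rw [replaceC_block '[' ['[','4','*',']'] ['[','1','3','C',']'] ⟨_, rfl⟩ ['[','1','3','C',']'] (by intro y; simp) (by decide)]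
    rw [replaceC_block '[' ['[','5','*',']'] ['[','1','3','C',']'] ⟨_, rfl⟩ ['[','1','3','C',']'] (by intro y; simp) (by decide)]
    rw [replaceC_block '[' ['[','6','*',']'] ['[','1','3','C',']'] ⟨_, rfl⟩ ['[','1','3','C',']'] (by intro y; simp) (by decide)]
    rw [replaceC_block '[' ['[','7','*',']'] ['[','1','3','C',']'] ⟨_, rfl⟩ ['[','1','3','C',']'] (by intro y; simp) (by decide)]
    rw [replaceC_block '[' ['[','8','*',']'] ['[','1','3','C',']'] ⟨_, rfl⟩ ['[','1','3','C',']'] (by intro y; simp) (by decide)]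
    rw [replaceC_block '[' ['[','9','*',']'] ['[','1','3','C',']'] ⟨_, rfl⟩ ['[','1','3','C',']'] (by intro y; simp) (by decide)]
    rw [replaceC_block '[' ['[','*','-',']'] ['[','1','3','C','-',']'] ⟨_, rfl⟩ ['[','1','3','C',']'] (by intro y; simp) (by decide)]
    rw [replaceC_block '[' ['[','*',':','0',']'] ['[','1','3','C',']'] ⟨_, rfl⟩ ['[','1','3','C',']'] (by intro y; simp) (by decide)]
    rw [replaceC_block '*' ['*'] ['[','1','3','C',']'] ⟨_, rfl⟩ ['[','1','3','C',']'] (by intro y; simp) (by decide)]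
  · -- pattern 2
    simp only [chainC, patsB_eq, List.foldl_cons, List.foldl_nil]
    rw [replaceC_block '[' ['[','1','*',']'] ['[','1','3','C',']'] ⟨_, rfl⟩ ['[','3','*',']'] (by intro y; simp) (by decide)]
    rw [replaceC_block '[' ['[','2','*',']'] ['[','1','3','C',']'] ⟨_, rfl⟩ ['[','3','*',']'] (by intro y; simp) (by decide)]
    rw [replaceC_head _ _ _ (by simp)]
    rw [replaceC_block '[' ['[','4','*',']'] ['[','1','3','C',']'] ⟨_, rfl⟩ ['[','1','3','C',']'] (by intro y; simp) (by decide)]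
    rw [replaceC_block '[' ['[','5','*',']'] ['[','1','3','C',']'] ⟨_, rfl⟩ ['[','1','3','C',']'] (by intro y; simp) (by decide)]
    rw [replaceC_block '[' ['[','6','*',']'] ['[','1','3','C',']'] ⟨_, rfl⟩ ['[','1','3','C',']'] (by intro y; simp) (by decide)]
    rw [replaceC_block '[' ['[','7','*',']'] ['[','1','3','C',']'] ⟨_, rfl⟩ ['[','1','3','C',']'] (by intro y; simp) (by decide)]
    rw [replaceC_block '[' ['[','8','*',']'] ['[','1','3','C',']'] ⟨_, rfl⟩ ['[','1','3','C',']'] (by intro y; simp) (by decide)]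
    rw [replaceC_block '[' ['[','9','*',']'] ['[','1','3','C',']'] ⟨_, rfl⟩ ['[','1','3','C',']'] (by intro y; simp) (by decide)]
    rw [replaceC_block '[' ['[','*','-',']'] ['[','1','3','C','-',']'] ⟨_, rfl⟩ ['[','1','3','C',']'] (by intro y; simp) (by decide)]
    rw [replaceC_block '[' ['[','*',':','0',']'] ['[','1','3','C',']'] ⟨_, rfl⟩ ['[','1','3','C',']'] (by intro y; simp) (by decide)]
    rw [replaceC_block '*' ['*'] ['[','1','3','C',']'] ⟨_, rfl⟩ ['[','1','3','C',']'] (by intro y; simp) (by decide)]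
  · -- pattern 3
    simp only [chainC, patsB_eq, List.foldl_cons, List.foldl_nil]
    rw [replaceC_block '[' ['[','1','*',']'] ['[','1','3','C',']'] ⟨_, rfl⟩ ['[','4','*',']'] (by intro y; simp) (by decide)]
    rw [replaceC_block '[' ['[','2','*',']'] ['[','1','3','C',']'] ⟨_, rfl⟩ ['[','4','*',']'] (by intro y; simp) (by decide)]
    rw [replaceC_block '[' ['[','3','*',']'] ['[','1','3','C',']'] ⟨_, rfl⟩ ['[','4','*',']'] (by intro y; simp) (by decide)]
    rw [replaceC_head _ _ _ (by simp)]
    rw [replaceC_block '[' ['[','5','*',']'] ['[','1','3','C',']'] ⟨_, rfl⟩ ['[','1','3','C',']'] (by intro y; simp) (by decide)]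
    rw [replaceC_block '[' ['[','6','*',']'] ['[','1','3','C',']'] ⟨_, rfl⟩ ['[','1','3','C',']'] (by intro y; simp) (by decide)]
    rw [replaceC_block '[' ['[','7','*',']'] ['[','1','3','C',']'] ⟨_, rfl⟩ ['[','1','3','C',']'] (by intro y; simp) (by decide)]
    rw [replaceC_block '[' ['[','8','*',']'] ['[','1','3','C',']'] ⟨_, rfl⟩ ['[','1','3','C',']'] (by intro y; simp) (by decide)]
    rw [replaceC_block '[' ['[','9','*',']'] ['[','1','3','C',']'] ⟨_, rfl⟩ ['[','1','3','C',']'] (by intro y; simp) (by decide)]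
    rw [replaceC_block '[' ['[','*','-',']'] ['[','1','3','C','-',']'] ⟨_, rfl⟩ ['[','1','3','C',']'] (by intro y; simp) (by decide)]
    rw [replaceC_block '[' ['[','*',':','0',']'] ['[','1','3','C',']'] ⟨_, rfl⟩ ['[','1','3','C',']'] (by intro y; simp) (by decide)]
    rw [replaceC_block '*' ['*'] ['[','1','3','C',']'] ⟨_, rfl⟩ ['[','1','3','C',']'] (by intro y; simp) (by decide)]
  · -- pattern 4
    simp only [chainC, patsB_eq, List.foldl_cons, List.foldl_nil]
    rw [replaceC_block '[' ['[','1','*',']'] ['[','1','3','C',']'] ⟨_, rfl⟩ ['[','5','*',']'] (by intro y; simp) (by decide)]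
    rw [replaceC_block '[' ['[','2','*',']'] ['[','1','3','C',']'] ⟨_, rfl⟩ ['[','5','*',']'] (by intro y; simp) (by decide)]
    rw [replaceC_block '[' ['[','3','*',']'] ['[','1','3','C',']'] ⟨_, rfl⟩ ['[','5','*',']'] (by intro y; simp) (by decide)]
    rw [replaceC_block '[' ['[','4','*',']'] ['[','1','3','C',']'] ⟨_, rfl⟩ ['[','5','*',']'] (by intro y; simp) (by decide)]
    rw [replaceC_head _ _ _ (by simp)]
    rw [replaceC_block '[' ['[','6','*',']'] ['[','1','3','C',']'] ⟨_, rfl⟩ ['[','1','3','C',']'] (by intro y; simp) (by decide)]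
    rw [replaceC_block '[' ['[','7','*',']'] ['[','1','3','C',']'] ⟨_, rfl⟩ ['[','1','3','C',']'] (by intro y; simp) (by decide)]
    rw [replaceC_block '[' ['[','8','*',']'] ['[','1','3','C',']'] ⟨_, rfl⟩ ['[','1','3','C',']'] (by intro y; simp) (by decide)]
    rw [replaceC_block '[' ['[','9','*',']'] ['[','1','3','C',']'] ⟨_, rfl⟩ ['[','1','3','C',']'] (by intro y; simp) (by decide)]
    rw [replaceC_block '[' ['[','*','-',']'] ['[','1','3','C','-',']'] ⟨_, rfl⟩ ['[','1','3','C',']'] (by intro y; simp) (by decide)]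
    rw [replaceC_block '[' ['[','*',':','0',']'] ['[','1','3','C',']'] ⟨_, rfl⟩ ['[','1','3','C',']'] (by intro y; simp) (by decide)]
    rw [replaceC_block '*' ['*'] ['[','1','3','C',']'] ⟨_, rfl⟩ ['[','1','3','C',']'] (by intro y; simp) (by decide)]
  · -- pattern 5
    simp only [chainC, patsB_eq, List.foldl_cons, List.foldl_nil]
    rw [replaceC_block '[' ['[','1','*',']'] ['[','1','3','C',']'] ⟨_, rfl⟩ ['[','6','*',']'] (by intro y; simp) (by decide)]
    rw [replaceC_block '[' ['[','2','*',']'] ['[','1','3','C',']'] ⟨_, rfl⟩ ['[','6','*',']'] (by intro y; simp) (by decide)]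
    rw [replaceC_block '[' ['[','3','*',']'] ['[','1','3','C',']'] ⟨_, rfl⟩ ['[','6','*',']'] (by intro y; simp) (by decide)]
    rw [replaceC_block '[' ['[','4','*',']'] ['[','1','3','C',']'] ⟨_, rfl⟩ ['[','6','*',']'] (by intro y; simp) (by decide)]
    rw [replaceC_block '[' ['[','5','*',']'] ['[','1','3','C',']'] ⟨_, rfl⟩ ['[','6','*',']'] (by intro y; simp) (by decide)]
    rw [replaceC_head _ _ _ (by simp)]
    rw [replaceC_block '[' ['[','7','*',']'] ['[','1','3','C',']'] ⟨_, rfl⟩ ['[','1','3','C',']'] (by intro y; simp) (by decide)]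
    rw [replaceC_block '[' ['[','8','*',']'] ['[','1','3','C',']'] ⟨_, rfl⟩ ['[','1','3','C',']'] (by intro y; simp) (by decide)]
    rw [replaceC_block '[' ['[','9','*',']'] ['[','1','3','C',']'] ⟨_, rfl⟩ ['[','1','3','C',']'] (by intro y; simp) (by decide)]
    rw [replaceC_block '[' ['[','*','-',']'] ['[','1','3','C','-',']'] ⟨_, rfl⟩ ['[','1','3','C',']'] (by intro y; simp) (by decide)]
    rw [replaceC_block '[' ['[','*',':','0',']'] ['[','1','3','C',']'] ⟨_, rfl⟩ ['[','1','3','C',']'] (by intro y; simp) (by decide)]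
    rw [replaceC_block '*' ['*'] ['[','1','3','C',']'] ⟨_, rfl⟩ ['[','1','3','C',']'] (by intro y; simp) (by decide)]
  · -- pattern 6
    simp only [chainC, patsB_eq, List.foldl_cons, List.foldl_nil]
    rw [replaceC_block '[' ['[','1','*',']'] ['[','1','3','C',']'] ⟨_, rfl⟩ ['[','7','*',']'] (by intro y; simp) (by decide)]
    rw [replaceC_block '[' ['[','2','*',']'] ['[','1','3','C',']'] ⟨_, rfl⟩ ['[','7','*',']'] (by intro y; simp) (by decide)]
    rw [replaceC_block '[' ['[','3','*',']'] ['[','1','3','C',']'] ⟨_, rfl⟩ ['[','7','*',']'] (by intro y; simp) (by decide)]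
    rw [replaceC_block '[' ['[','4','*',']'] ['[','1','3','C',']'] ⟨_, rfl⟩ ['[','7','*',']'] (by intro y; simp) (by decide)]
    rw [replaceC_block '[' ['[','5','*',']'] ['[','1','3','C',']'] ⟨_, rfl⟩ ['[','7','*',']'] (by intro y; simp) (by decide)]
    rw [replaceC_block '[' ['[','6','*',']'] ['[','1','3','C',']'] ⟨_, rfl⟩ ['[','7','*',']'] (by intro y; simp) (by decide)]
    rw [replaceC_head _ _ _ (by simp)]
    rw [replaceC_block '[' ['[','8','*',']'] ['[','1','3','C',']'] ⟨_, rfl⟩ ['[','1','3','C',']'] (by intro y; simp) (by decide)]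
    rw [replaceC_block '[' ['[','9','*',']'] ['[','1','3','C',']'] ⟨_, rfl⟩ ['[','1','3','C',']'] (by intro y; simp) (by decide)]
    rw [replaceC_block '[' ['[','*','-',']'] ['[','1','3','C','-',']'] ⟨_, rfl⟩ ['[','1','3','C',']'] (by intro y; simp) (by decide)]
    rw [replaceC_block '[' ['[','*',':','0',']'] ['[','1','3','C',']'] ⟨_, rfl⟩ ['[','1','3','C',']'] (by intro y; simp) (by decide)]
    rw [replaceC_block '*' ['*'] ['[','1','3','C',']'] ⟨_, rfl⟩ ['[','1','3','C',']'] (by intro y; simp) (by decide)]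
  · -- pattern 7
    simp only [chainC, patsB_eq, List.foldl_cons, List.foldl_nil]
    rw [replaceC_block '[' ['[','1','*',']'] ['[','1','3','C',']'] ⟨_, rfl⟩ ['[','8','*',']'] (by intro y; simp) (by decide)]
    rw [replaceC_block '[' ['[','2','*',']'] ['[','1','3','C',']'] ⟨_, rfl⟩ ['[','8','*',']'] (by intro y; simp) (by decide)]
    rw [replaceC_block '[' ['[','3','*',']'] ['[','1','3','C',']'] ⟨_, rfl⟩ ['[','8','*',']'] (by intro y; simp) (by decide)]
    rw [replaceC_block '[' ['[','4','*',']'] ['[','1','3','C',']'] ⟨_, rfl⟩ ['[','8','*',']'] (by intro y; simp) (by decide)]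
    rw [replaceC_block '[' ['[','5','*',']'] ['[','1','3','C',']'] ⟨_, rfl⟩ ['[','8','*',']'] (by intro y; simp) (by decide)]
    rw [replaceC_block '[' ['[','6','*',']'] ['[','1','3','C',']'] ⟨_, rfl⟩ ['[','8','*',']'] (by intro y; simp) (by decide)]
    rw [replaceC_block '[' ['[','7','*',']'] ['[','1','3','C',']'] ⟨_, rfl⟩ ['[','8','*',']'] (by intro y; simp) (by decide)]
    rw [replaceC_head _ _ _ (by simp)]
    rw [replaceC_block '[' ['[','9','*',']'] ['[','1','3','C',']'] ⟨_, rfl⟩ ['[','1','3','C',']'] (by intro y; simp) (by decide)]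
    rw [replaceC_block '[' ['[','*','-',']'] ['[','1','3','C','-',']'] ⟨_, rfl⟩ ['[','1','3','C',']'] (by intro y; simp) (by decide)]
    rw [replaceC_block '[' ['[','*',':','0',']'] ['[','1','3','C',']'] ⟨_, rfl⟩ ['[','1','3','C',']'] (by intro y; simp) (by decide)]
    rw [replaceC_block '*' ['*'] ['[','1','3','C',']'] ⟨_, rfl⟩ ['[','1','3','C',']'] (by intro y; simp) (by decide)]
  · -- pattern 8
    simp only [chainC, patsB_eq, List.foldl_cons, List.foldl_nil]
    rw [replaceC_block '[' ['[','1','*',']'] ['[','1','3','C',']'] ⟨_, rfl⟩ ['[','9','*',']'] (by intro y; simp) (by decide)]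
    rw [replaceC_block '[' ['[','2','*',']'] ['[','1','3','C',']'] ⟨_, rfl⟩ ['[','9','*',']'] (by intro y; simp) (by decide)]
    rw [replaceC_block '[' ['[','3','*',']'] ['[','1','3','C',']'] ⟨_, rfl⟩ ['[','9','*',']'] (by intro y; simp) (by decide)]
    rw [replaceC_block '[' ['[','4','*',']'] ['[','1','3','C',']'] ⟨_, rfl⟩ ['[','9','*',']'] (by intro y; simp) (by decide)]
    rw [replaceC_block '[' ['[','5','*',']'] ['[','1','3','C',']'] ⟨_, rfl⟩ ['[','9','*',']'] (by intro y; simp) (by decide)]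
    rw [replaceC_block '[' ['[','6','*',']'] ['[','1','3','C',']'] ⟨_, rfl⟩ ['[','9','*',']'] (by intro y; simp) (by decide)]
    rw [replaceC_block '[' ['[','7','*',']'] ['[','1','3','C',']'] ⟨_, rfl⟩ ['[','9','*',']'] (by intro y; simp) (by decide)]
    rw [replaceC_block '[' ['[','8','*',']'] ['[','1','3','C',']'] ⟨_, rfl⟩ ['[','9','*',']'] (by intro y; simp) (by decide)]
    rw [replaceC_head _ _ _ (by simp)]
    rw [replaceC_block '[' ['[','*','-',']'] ['[','1','3','C','-',']'] ⟨_, rfl⟩ ['[','1','3','C',']'] (by intro y; simp) (by decide)]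
    rw [replaceC_block '[' ['[','*',':','0',']'] ['[','1','3','C',']'] ⟨_, rfl⟩ ['[','1','3','C',']'] (by intro y; simp) (by decide)]
    rw [replaceC_block '*' ['*'] ['[','1','3','C',']'] ⟨_, rfl⟩ ['[','1','3','C',']'] (by intro y; simp) (by decide)]
  · -- pattern 9
    simp only [chainC, patsB_eq, List.foldl_cons, List.foldl_nil]
    rw [replaceC_block '[' ['[','1','*',']'] ['[','1','3','C',']'] ⟨_, rfl⟩ ['[','*','-',']'] (by intro y; simp) (by decide)]
    rw [replaceC_block '[' ['[','2','*',']'] ['[','1','3','C',']'] ⟨_, rfl⟩ ['[','*','-',']'] (by intro y; simp) (by decide)]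
    rw [replaceC_block '[' ['[','3','*',']'] ['[','1','3','C',']'] ⟨_, rfl⟩ ['[','*','-',']'] (by intro y; simp) (by decide)]
    rw [replaceC_block '[' ['[','4','*',']'] ['[','1','3','C',']'] ⟨_, rfl⟩ ['[','*','-',']'] (by intro y; simp) (by decide)]
    rw [replaceC_block '[' ['[','5','*',']'] ['[','1','3','C',']'] ⟨_, rfl⟩ ['[','*','-',']'] (by intro y; simp) (by decide)]
    rw [replaceC_block '[' ['[','6','*',']'] ['[','1','3','C',']'] ⟨_, rfl⟩ ['[','*','-',']'] (by intro y; simp) (by decide)]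
    rw [replaceC_block '[' ['[','7','*',']'] ['[','1','3','C',']'] ⟨_, rfl⟩ ['[','*','-',']'] (by intro y; simp) (by decide)]
    rw [replaceC_block '[' ['[','8','*',']'] ['[','1','3','C',']'] ⟨_, rfl⟩ ['[','*','-',']'] (by intro y; simp) (by decide)]
    rw [replaceC_block '[' ['[','9','*',']'] ['[','1','3','C',']'] ⟨_, rfl⟩ ['[','*','-',']'] (by intro y; simp) (by decide)]
    rw [replaceC_head _ _ _ (by simp)]
    rw [replaceC_block '[' ['[','*',':','0',']'] ['[','1','3','C',']'] ⟨_, rfl⟩ ['[','1','3','C','-',']'] (by intro y; simp) (by decide)]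
    rw [replaceC_block '*' ['*'] ['[','1','3','C',']'] ⟨_, rfl⟩ ['[','1','3','C','-',']'] (by intro y; simp) (by decide)]
  · -- pattern 10
    simp only [chainC, patsB_eq, List.foldl_cons, List.foldl_nil]
    rw [replaceC_block '[' ['[','1','*',']'] ['[','1','3','C',']'] ⟨_, rfl⟩ ['[','*',':','0',']'] (by intro y; simp) (by decide)]
    rw [replaceC_block '[' ['[','2','*',']'] ['[','1','3','C',']'] ⟨_, rfl⟩ ['[','*',':','0',']'] (by intro y; simp) (by decide)]
    rw [replaceC_block '[' ['[','3','*',']'] ['[','1','3','C',']'] ⟨_, rfl⟩ ['[','*',':','0',']'] (by intro y; simp) (by decide)]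
    rw [replaceC_block '[' ['[','4','*',']'] ['[','1','3','C',']'] ⟨_, rfl⟩ ['[','*',':','0',']'] (by intro y; simp) (by decide)]
    rw [replaceC_block '[' ['[','5','*',']'] ['[','1','3','C',']'] ⟨_, rfl⟩ ['[','*',':','0',']'] (by intro y; simp) (by decide)]
    rw [replaceC_block '[' ['[','6','*',']'] ['[','1','3','C',']'] ⟨_, rfl⟩ ['[','*',':','0',']'] (by intro y; simp) (by decide)]
    rw [replaceC_block '[' ['[','7','*',']'] ['[','1','3','C',']'] ⟨_, rfl⟩ ['[','*',':','0',']'] (by intro y; simp) (by decide)]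
    rw [replaceC_block '[' ['[','8','*',']'] ['[','1','3','C',']'] ⟨_, rfl⟩ ['[','*',':','0',']'] (by intro y; simp) (by decide)]
    rw [replaceC_block '[' ['[','9','*',']'] ['[','1','3','C',']'] ⟨_, rfl⟩ ['[','*',':','0',']'] (by intro y; simp) (by decide)]
    rw [replaceC_block '[' ['[','*','-',']'] ['[','1','3','C','-',']'] ⟨_, rfl⟩ ['[','*',':','0',']'] (by intro y; simp) (by decide)]
    rw [replaceC_head _ _ _ (by simp)]
    rw [replaceC_block '*' ['*'] ['[','1','3','C',']'] ⟨_, rfl⟩ ['[','1','3','C',']'] (by intro y; simp) (by decide)]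
  · -- pattern 11
    simp only [chainC, patsB_eq, List.foldl_cons, List.foldl_nil]
    rw [replaceC_block '[' ['[','1','*',']'] ['[','1','3','C',']'] ⟨_, rfl⟩ ['*'] (by intro y; simp) (by decide)]
    rw [replaceC_block '[' ['[','2','*',']'] ['[','1','3','C',']'] ⟨_, rfl⟩ ['*'] (by intro y; simp) (by decide)]
    rw [replaceC_block '[' ['[','3','*',']'] ['[','1','3','C',']'] ⟨_, rfl⟩ ['*'] (by intro y; simp) (by decide)]
    rw [replaceC_block '[' ['[','4','*',']'] ['[','1','3','C',']'] ⟨_, rfl⟩ ['*'] (by intro y; simp) (by decide)]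
    rw [replaceC_block '[' ['[','5','*',']'] ['[','1','3','C',']'] ⟨_, rfl⟩ ['*'] (by intro y; simp) (by decide)]
    rw [replaceC_block '[' ['[','6','*',']'] ['[','1','3','C',']'] ⟨_, rfl⟩ ['*'] (by intro y; simp) (by decide)]
    rw [replaceC_block '[' ['[','7','*',']'] ['[','1','3','C',']'] ⟨_, rfl⟩ ['*'] (by intro y; simp) (by decide)]
    rw [replaceC_block '[' ['[','8','*',']'] ['[','1','3','C',']'] ⟨_, rfl⟩ ['*'] (by intro y; simp) (by decide)]
    rw [replaceC_block '[' ['[','9','*',']'] ['[','1','3','C',']'] ⟨_, rfl⟩ ['*'] (by intro y; simp) (by decide)]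
    rw [replaceC_block '[' ['[','*','-',']'] ['[','1','3','C','-',']'] ⟨_, rfl⟩ ['*'] (by intro y; simp) (by decide)]
    rw [replaceC_block '[' ['[','*',':','0',']'] ['[','1','3','C',']'] ⟨_, rfl⟩ ['*'] (by intro y; simp) (by decide)]
    rw [replaceC_head _ _ _ (by simp)]
lemma replaceC_nil (pat rep : List Char) : replaceC pat rep [] = [] := by rw [replaceC]
lemma chainC_nil : chainC [] = [] := by
  simp [chainC, patsB_eq, replaceC_nil]
lemma patsB_shape : ∀ p ∈ patsB, (∃ w, p.1 = '[' :: w ∧ '[' ∉ w) ∨ p.1 = ['*'] := by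
  intro p hp
  simp only [patsB_eq, List.mem_cons, List.not_mem_nil, or_false] at hp
  rcases hp with rfl|rfl|rfl|rfl|rfl|rfl|rfl|rfl|rfl|rfl|rfl|rfl
  all_goals first
    | exact Or.inl ⟨_, rfl, by decide⟩
    | exact Or.inr rfl
lemma patsB_rep : ∀ p ∈ patsB, ∃ r', p.2 = '[' :: r' := by
  intro p hp
  simp only [patsB_eq, List.mem_cons, List.not_mem_nil, or_false] at hp
  rcases hp with rfl|rfl|rfl|rfl|rfl|rfl|rfl|rfl|rfl|rfl|rfl|rfl
  all_goals exact ⟨_, rfl⟩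
lemma chain_eq_scan : ∀ (n : Nat) (s : List Char), s.length ≤ n → chainC s = scanB s := by
  intro n
  induction n with
  | zero =>
    intro s hs
    have : s = [] := List.eq_nil_of_length_eq_zero (Nat.le_zero.mp hs)
    subst this
    rw [chainC_nil, scanB]
  | succ n ih =>
    intro s hs
    cases s with
    | nil => rw [chainC_nil, scanB]
    | cons c t =>
      rw [scanB]
      cases hfind : patsB.find? (fun p => p.1.isPrefixOf (c :: t)) with
      | none =>
        have hno : ∀ p ∈ patsB, ¬ p.1 <+: (c :: t) := by
          intro p hp
          have := List.find?_eq_none.mp hfind p hp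
          simpa [List.isPrefixOf_iff_prefix] using this
        have : chainC (c :: t) = c :: chainC t :=
          chain_cons_nomatch patsB patsB_shape patsB_rep c t hno
        rw [this, ih t (by simpa using Nat.lt_succ_iff.mp (Nat.lt_of_lt_of_le (Nat.lt_succ_self _) hs))]
      | some pr =>
        obtain ⟨pat, rep⟩ := pr
        have hmem : (pat, rep) ∈ patsB := List.mem_of_find?_eq_some hfind
        have hpre : pat <+: (c :: t) := by
          have h := List.find?_some hfind
          simpa [List.isPrefixOf_iff_prefix] using h
        obtain ⟨x, hx⟩ := hpre
        obtain ⟨p0, pt, rfl⟩ : ∃ p0 pt, pat = p0 :: pt := by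
          rcases patsB_shape _ hmem with ⟨w, hw, _⟩ | hw
          · exact ⟨_, _, hw⟩
          · exact ⟨_, _, hw⟩
        have ht : t = pt ++ x := by
          have := congrArg List.tail hx
          simpa using this.symm
        have hdrop : t.drop ((p0 :: pt).length - 1) = x := by
          rw [ht]; simp
        dsimp only
        rw [hdrop]
        rw [← hx, chain_match _ _ hmem]
        have hlen : x.length ≤ n := by
          have := congrArg List.length hx
          simp at this hs
          omega
        rw [ih x hlen]
lemma toList_portA (s : String) : (modify_rxn_smiles s).toList = chainC s.toList := by
  simp only [modify_rxn_smiles, replacementsA, List.foldl_cons, List.foldl_nil,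
    PySem.Str.toList_replace]
  simp only [charsReplace_eq_replaceC _ ("[1*]".toList) _ (by decide), charsReplace_eq_replaceC _ ("[2*]".toList) _ (by decide), charsReplace_eq_replaceC _ ("[3*]".toList) _ (by decide), charsReplace_eq_replaceC _ ("[4*]".toList) _ (by decide), charsReplace_eq_replaceC _ ("[5*]".toList) _ (by decide), charsReplace_eq_replaceC _ ("[6*]".toList) _ (by decide), charsReplace_eq_replaceC _ ("[7*]".toList) _ (by decide), charsReplace_eq_replaceC _ ("[8*]".toList) _ (by decide), charsReplace_eq_replaceC _ ("[9*]".toList) _ (by decide), charsReplace_eq_replaceC _ ("[*-]".toList) _ (by decide), charsReplace_eq_replaceC _ ("[*:0]".toList) _ (by decide), charsReplace_eq_replaceC _ ("*".toList) _ (by decide)]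
  rfl

-- ===== VERDICT (by name: the statement is the Claim_ definition above) =====
theorem modify_rxn_smiles_spec : Claim_equal_modify_rxn_smiles := by
  intro s _
  unfold Spec_modify_rxn_smiles
  have h : (modify_rxn_smiles s).toList = scanB s.toList := by
    rw [toList_portA, chain_eq_scan s.toList.length _ (Nat.le_refl _)]
  calc modify_rxn_smiles s = String.ofList (modify_rxn_smiles s).toList := by
        rw [String.ofList_toList]
    _ = modify_rxn_smiles_alt s := by rw [h]; rfl
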